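-- pv_equiv track=rewrite | github.com/SymmetricChaos/NumberTheory | Sequences/BaseDependent.py | _subseq
-- ===== SOURCE A (Python) =====
-- def _subseq(subseq, L):
--     try:
--         l = len(subseq)
--     except TypeError:
--         l = 1
--         subseq = type(L)((subseq,))
--
--     for i in range(len(L)):
--         if L[i:i+l] == subseq:
--             return True
--     return False
-- ===== SOURCE B (Python) =====
-- def _subseq(subseq, L):
--     # Rabin-Karp style rolling-hash search (exact big-int hash, verified on match).
--     l = len(subseq)
--     n = len(L)
--     if l == 0:
--         return True
--     if l > n:
--         return False
--     base = 1 << 32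
--     top = base ** (l - 1)
--     hs = 0
--     for x in subseq:
--         hs = hs * base + x
--     hw = 0
--     for x in L[:l]:
--         hw = hw * base + x
--     i = 0
--     while True:
--         if hw == hs and L[i:i+l] == subseq:
--             return True
--         if i + l >= n:
--             return False
--         hw = (hw - L[i] * top) * base + L[i + l]
--         i += 1
-- ===== Notes on version B (the rewrite author's own statement) =====
-- stated objective: alternative
-- what changed: Replaces the naive scan that slices and compares the whole window at every index with a Rabin-Karp rolling-hash search: an exact big-integer window hash is updated in O(1) big-int ops per shift and the window is compared elementwise only when the hashes agree.
-- intended difference: On subseq = [] with L = [], A's loop over range(len(L)) never runs and A returns False, while B returns True; the empty sequence is a contiguous subsequence of every list, so True is the intended value. — e.g. on _subseq([], []): A returns false, B returns true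
import Mathlib
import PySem

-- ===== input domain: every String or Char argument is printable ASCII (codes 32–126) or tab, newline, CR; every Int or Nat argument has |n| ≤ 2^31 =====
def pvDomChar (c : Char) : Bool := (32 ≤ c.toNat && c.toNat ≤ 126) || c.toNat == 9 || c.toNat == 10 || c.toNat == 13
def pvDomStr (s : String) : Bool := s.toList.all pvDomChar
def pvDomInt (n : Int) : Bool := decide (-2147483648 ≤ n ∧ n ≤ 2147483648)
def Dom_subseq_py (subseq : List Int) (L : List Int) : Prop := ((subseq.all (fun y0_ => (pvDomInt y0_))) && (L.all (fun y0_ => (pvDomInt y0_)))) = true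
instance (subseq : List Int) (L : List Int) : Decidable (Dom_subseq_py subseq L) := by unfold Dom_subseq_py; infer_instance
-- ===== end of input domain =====

-- B replaces A's naive slice-and-compare scan with a Rabin-Karp rolling-hash search
-- (exact big-int hash, window compared only on hash match): a different algorithm of similar cost.

-- ===== PORT A =====
-- A's loop 'for i in range(len(L)): if L[i:i+l] == subseq: return True' (the try/except
-- branch is unreachable: subseq is a list here, so len() never raises TypeError).
def subseqA_go (subseq L : List Int) (l : Int) : List Int → Bool
  | [] => false
  | i :: rest =>
    if PySem.List.slice L (some i) (some (i + l)) = subseq then true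
    else subseqA_go subseq L l rest

def subseq_py (subseq : List Int) (L : List Int) : Bool :=
  subseqA_go subseq L (subseq.length : Int) (PySem.List.pyRange 0 (L.length : Int) 1)

-- ===== PORT B =====
-- hash accumulation loop 'for x in xs: h = h*base + x'
def bHash (base : Int) (xs : List Int) : Int := xs.foldl (fun h x => h * base + x) 0

-- Source B's while-loop; the Nat argument k counts the remaining iterations (k = n - l - i),
-- so 'k = 0' is exactly the exit test 'i + l >= n'.  L[i] and L[i+l] are in range whenever
-- read (0 ≤ i and i + l < n there), so pyGetD _ _ 0 is exact Python indexing.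
def subseqB_loop (subseq L : List Int) (hs top base l : Int) : Nat → Int → Int → Bool
  | k, i, hw =>
    if hw = hs ∧ PySem.List.slice L (some i) (some (i + l)) = subseq then true
    else
      match k with
      | 0 => false
      | k + 1 =>
        subseqB_loop subseq L hs top base l k (i + 1)
          ((hw - (PySem.List.pyGetD L i 0) * top) * base + PySem.List.pyGetD L (i + l) 0)

def subseq_py_alt (subseq : List Int) (L : List Int) : Bool :=
  let l : Int := subseq.length
  let n : Int := L.length
  if l = 0 then true
  else if n < l then false
  else
    let base : Int := 2 ^ 32
    let top : Int := base ^ (l - 1).toNat   -- Python base ** (l-1); l ≥ 1 here so the exponent is the Nat l-1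
    let hs := bHash base subseq
    let hw := bHash base (PySem.List.slice L none (some l))   -- hash of L[:l]
    subseqB_loop subseq L hs top base l (n - l).toNat 0 hw

-- ===== PRECONDITION & SPEC =====
-- On subseq = [] and L = [], A returns False (its loop over range(len(L)) never runs) while B
-- returns True; the empty list is a contiguous subsequence of every list, so True is intended.
def D_subseq_py (subseq : List Int) (L : List Int) : Prop := subseq = [] ∧ L = []
instance (subseq : List Int) (L : List Int) : Decidable (D_subseq_py subseq L) := by unfold D_subseq_py; infer_instance

def Spec_subseq_py (subseq : List Int) (L : List Int) (out : Bool) : Prop := ¬ D_subseq_py subseq L → out = subseq_py_alt subseq L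
instance (subseq : List Int) (L : List Int) (out : Bool) : Decidable (Spec_subseq_py subseq L out) := by unfold Spec_subseq_py; infer_instance

def pvDiffWitness_subseq_py : List Int × List Int := ([], [])
def pvDiffWitnessOut_subseq_py : Bool × Bool := (false, true)

-- ===== CLAIM (what is proved, stated in full; the proofs are below) =====
def Claim_unchanged_subseq_py : Prop := ∀ (subseq : List Int) (L : List Int), Dom_subseq_py subseq L → Spec_subseq_py subseq L (subseq_py subseq L)
def Claim_changed_subseq_py : Prop := Dom_subseq_py (pvDiffWitness_subseq_py.1) (pvDiffWitness_subseq_py.2) ∧ D_subseq_py (pvDiffWitness_subseq_py.1) (pvDiffWitness_subseq_py.2) ∧ subseq_py (pvDiffWitness_subseq_py.1) (pvDiffWitness_subseq_py.2) = pvDiffWitnessOut_subseq_py.1 ∧ subseq_py_alt (pvDiffWitness_subseq_py.1) (pvDiffWitness_subseq_py.2) = pvDiffWitnessOut_subseq_py.2 ∧ pvDiffWitnessOut_subseq_py.1 ≠ pvDiffWitnessOut_subseq_py.2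
def Claim_exact_subseq_py : Prop := ∀ (subseq : List Int) (L : List Int), Dom_subseq_py subseq L → D_subseq_py subseq L → subseq_py subseq L ≠ subseq_py_alt subseq L

-- ===== LEMMAS AND PROOFS =====

theorem aGo_iff (subseq L : List Int) (l : Int) (idxs : List Int) :
    subseqA_go subseq L l idxs = true ↔
      ∃ i ∈ idxs, PySem.List.slice L (some i) (some (i + l)) = subseq := by
  induction idxs with
  | nil => simp [subseqA_go]
  | cons i rest ih =>
    by_cases h : PySem.List.slice L (some i) (some (i + l)) = subseq
    · simp [subseqA_go, h]
    · simp [subseqA_go, h, ih]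

theorem slice_window (L subseq : List Int) (i : Nat) :
    PySem.List.slice L (some (i : Int)) (some ((i : Int) + (subseq.length : Int)))
      = (L.drop i).take subseq.length := by
  have := PySem.List.slice_natCast_add (xs := L) (j := i) (n := subseq.length)
  simpa using this

theorem window_len (L subseq : List Int) (j : Nat)
    (h : (L.drop j).take subseq.length = subseq) (hpos : 0 < subseq.length) :
    j + subseq.length ≤ L.length := by
  have hlen := congrArg List.length h
  simp [List.length_take, List.length_drop] at hlen
  omega

theorem bHash_shift (base : Int) (xs : List Int) :
    ∀ a : Int, xs.foldl (fun h x => h * base + x) a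
      = a * base ^ xs.length + bHash base xs := by
  induction xs with
  | nil => intro a; simp [bHash]
  | cons x xs ih =>
    intro a
    simp only [List.foldl_cons, bHash, List.length_cons] at *
    rw [ih (a * base + x), ih (0 * base + x)]
    ring

theorem bHash_cons (base x : Int) (xs : List Int) :
    bHash base (x :: xs) = x * base ^ xs.length + bHash base xs := by
  simp only [bHash, List.foldl_cons]
  simpa using bHash_shift base xs (0 * base + x)

theorem bHash_snoc (base d : Int) (xs : List Int) :
    bHash base (xs ++ [d]) = bHash base xs * base + d := by
  simp [bHash, List.foldl_append]

-- the rolling-hash update is exact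
theorem roll (base : Int) (L : List Int) (i m : Nat) (hm : 0 < m) (hL : i + m < L.length) :
    bHash base ((L.drop (i + 1)).take m)
      = (bHash base ((L.drop i).take m) - (PySem.List.pyGetD L (i : Int) 0) * base ^ (m - 1)) * base
        + PySem.List.pyGetD L ((i : Int) + (m : Int)) 0 := by
  obtain ⟨m', rfl⟩ : ∃ m', m = m' + 1 := ⟨m - 1, by omega⟩
  have hiL : i < L.length := by omega
  have hdrop : L.drop i = L[i] :: L.drop (i + 1) := List.drop_eq_getElem_cons hiL
  have hw1 : (L.drop i).take (m' + 1) = L[i] :: (L.drop (i + 1)).take m' := by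
    rw [hdrop, List.take_succ_cons]
  have hlen : ((L.drop (i + 1)).take m').length = m' := by
    simp [List.length_take, List.length_drop]; omega
  have hget : (L.drop (i + 1))[m']? = some (L[i + (m' + 1)]'(by omega)) := by
    rw [List.getElem?_drop, List.getElem?_eq_getElem (by omega : i + 1 + m' < L.length)]
    simp only [show i + 1 + m' = i + (m' + 1) by omega]
  have hw2 : (L.drop (i + 1)).take (m' + 1)
      = (L.drop (i + 1)).take m' ++ [L[i + (m' + 1)]'(by omega)] := by
    rw [List.take_add_one, hget]
    rfl
  have hg1 : PySem.List.pyGetD L (i : Int) 0 = L[i] := by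
    rw [PySem.List.pyGetD_natCast]; exact List.getD_eq_getElem L 0 hiL
  have hg2 : PySem.List.pyGetD L ((i : Int) + ((m' + 1 : Nat) : Int)) 0 = L[i + (m' + 1)]'(by omega) := by
    have hc : (i : Int) + ((m' + 1 : Nat) : Int) = ((i + (m' + 1) : Nat) : Int) := by push_cast; ring
    rw [hc, PySem.List.pyGetD_natCast]
    exact List.getD_eq_getElem L 0 (by omega)
  rw [hw1, hw2, bHash_cons, bHash_snoc, hlen, hg1, hg2]
  simp only [Nat.add_sub_cancel]
  ring

-- the B loop finds a match at or after i iff one exists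
theorem loopB_iff (subseq L : List Int) (base top : Int)
    (hm : 0 < subseq.length)
    (htop : top = base ^ (subseq.length - 1)) :
    ∀ (k i : Nat), i + subseq.length + k = L.length →
      (subseqB_loop subseq L (bHash base subseq) top base (subseq.length : Int) k (i : Int)
          (bHash base ((L.drop i).take subseq.length)) = true
        ↔ ∃ j : Nat, i ≤ j ∧ j + subseq.length ≤ L.length ∧ (L.drop j).take subseq.length = subseq) := by
  subst htop
  intro k
  induction k with
  | zero =>
    intro i hk
    rw [subseqB_loop]
    by_cases h : (L.drop i).take subseq.length = subseq
    · simp only [slice_window, h]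
      simp only [and_self, if_true, true_iff]
      exact ⟨i, le_refl i, by omega, h⟩
    · simp only [slice_window, h, and_false, if_false, Bool.false_eq_true, false_iff]
      rintro ⟨j, hij, hjn, hwin⟩
      have : j = i := by omega
      exact h (this ▸ hwin)
  | succ k ih =>
    intro i hk
    rw [subseqB_loop]
    by_cases h : (L.drop i).take subseq.length = subseq
    · simp only [slice_window, h]
      simp only [and_self, if_true, true_iff]
      exact ⟨i, le_refl i, by omega, h⟩
    · simp only [slice_window, h, and_false, if_false]
      have hroll := roll base L i subseq.length hm (by omega)
      have hcast : ((i : Int) + 1) = ((i + 1 : Nat) : Int) := by push_cast; ring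
      rw [← hroll, hcast, ih (i + 1) (by omega)]
      constructor
      · rintro ⟨j, hij, hjn, hwin⟩; exact ⟨j, by omega, hjn, hwin⟩
      · rintro ⟨j, hij, hjn, hwin⟩
        refine ⟨j, ?_, hjn, hwin⟩
        rcases Nat.eq_or_lt_of_le hij with rfl | hlt
        · exact absurd hwin h
        · omega

-- characterization of A
theorem A_iff (subseq L : List Int) :
    subseq_py subseq L = true ↔
      ∃ i : Nat, i < L.length ∧ (L.drop i).take subseq.length = subseq := by
  rw [subseq_py, aGo_iff]
  constructor
  · rintro ⟨i, hmem, hsl⟩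
    rw [PySem.List.mem_pyRange_one] at hmem
    obtain ⟨h0, hn⟩ := hmem
    refine ⟨i.toNat, by omega, ?_⟩
    have : i = ((i.toNat : Nat) : Int) := by omega
    rw [this, slice_window] at hsl
    exact hsl
  · rintro ⟨i, hin, hwin⟩
    refine ⟨(i : Int), ?_, ?_⟩
    · rw [PySem.List.mem_pyRange_one]; omega
    · rw [slice_window]; exact hwin

-- characterization of B in the nontrivial case
theorem B_iff (subseq L : List Int) (hm : 0 < subseq.length) (hn : subseq.length ≤ L.length) :
    subseq_py_alt subseq L = true ↔
      ∃ j : Nat, j + subseq.length ≤ L.length ∧ (L.drop j).take subseq.length = subseq := by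
  rw [subseq_py_alt]
  simp only [if_neg (by omega : ¬ ((subseq.length : Int) = 0)),
    if_neg (by omega : ¬ ((L.length : Int) < (subseq.length : Int)))]
  have hsl : PySem.List.slice L none (some (subseq.length : Int)) = L.take subseq.length := by
    exact PySem.List.slice_to_natCast (xs := L) (b := subseq.length)
  rw [hsl]
  have h0 : L.take subseq.length = (L.drop 0).take subseq.length := by simp
  rw [h0]
  have htop : ((2:Int) ^ 32) ^ ((subseq.length : Int) - 1).toNat = (2 ^ 32 : Int) ^ (subseq.length - 1) := by
    congr 1; omega
  have hk : ((L.length : Int) - (subseq.length : Int)).toNat = L.length - subseq.length := by omega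
  have hzero : (0 : Int) = ((0 : Nat) : Int) := rfl
  rw [htop, hk, hzero,
    loopB_iff subseq L (2 ^ 32) ((2 ^ 32 : Int) ^ (subseq.length - 1)) hm rfl
      (L.length - subseq.length) 0 (by omega)]
  constructor
  · rintro ⟨j, _, hjn, hwin⟩; exact ⟨j, hjn, hwin⟩
  · rintro ⟨j, hjn, hwin⟩; exact ⟨j, Nat.zero_le j, hjn, hwin⟩

-- ===== VERDICT (by name: the statement is the Claim_ definitions above) =====
theorem subseq_py_spec : Claim_unchanged_subseq_py := by
  intro subseq L _ hD
  rcases Nat.eq_zero_or_pos subseq.length with hm | hm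
  · -- subseq = []; L ≠ [] since ¬ D
    have hs : subseq = [] := List.length_eq_zero_iff.mp hm
    have hL : L ≠ [] := by
      intro hL; exact hD ⟨hs, hL⟩
    have hB : subseq_py_alt subseq L = true := by
      rw [subseq_py_alt]; simp [hm]
    have hA : subseq_py subseq L = true := by
      rw [A_iff]
      exact ⟨0, by cases L with | nil => exact absurd rfl hL | cons a t => simp, by simp [hs]⟩
    rw [hA, hB]
  · by_cases hn : subseq.length ≤ L.length
    · have hAB := (A_iff subseq L)
      have hBB := (B_iff subseq L hm hn)
      by_cases hex : ∃ i : Nat, i < L.length ∧ (L.drop i).take subseq.length = subseq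
      · obtain ⟨i, hin, hwin⟩ := hex
        have hA : subseq_py subseq L = true := hAB.mpr ⟨i, hin, hwin⟩
        have hB : subseq_py_alt subseq L = true :=
          hBB.mpr ⟨i, window_len L subseq i hwin hm, hwin⟩
        rw [hA, hB]
      · have hA : subseq_py subseq L = false := by
          rw [← Bool.not_eq_true, hAB]
          rintro ⟨i, hin, hwin⟩
          exact hex ⟨i, hin, hwin⟩
        have hB : subseq_py_alt subseq L = false := by
          rw [← Bool.not_eq_true, hBB]
          rintro ⟨j, hjn, hwin⟩
          exact hex ⟨j, by omega, hwin⟩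
        rw [hA, hB]
    · -- pattern longer than L: both false
      have hB : subseq_py_alt subseq L = false := by
        rw [subseq_py_alt]
        simp only [if_neg (by omega : ¬ ((subseq.length : Int) = 0))]
        rw [if_pos (by omega : ((L.length : Int) < (subseq.length : Int)))]
      have hA : subseq_py subseq L = false := by
        rw [← Bool.not_eq_true, A_iff]
        rintro ⟨i, hin, hwin⟩
        have := window_len L subseq i hwin hm
        omega
      rw [hA, hB]

theorem subseq_py_changed : Claim_changed_subseq_py := by
  unfold Claim_changed_subseq_py; decide

theorem subseq_py_tight : Claim_exact_subseq_py := by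
  intro subseq L _ hD
  obtain ⟨hs, hL⟩ := hD
  subst hs; subst hL
  decide
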